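-- pv_equiv track=rewrite | github.com/Arnav-Rajarshi/NeuroLearn | backend/utils/progress_utils.py | count_completed_from_progress
-- ===== SOURCE A (Python) =====
-- from typing import Dict, Any, List, Optional
--
-- def count_completed_from_progress(
--     progress_json: Dict[str, Any],
--     all_topic_keys: Optional[List[str]] = None
-- ) -> int:
--     """
--     Count completed topics from progress_json.
--
--     Source of truth: Only counts topics where value is True.
--
--     Args:
--         progress_json: The progress dictionary
--         all_topic_keys: Optional list of valid topic keys to filter against
--
--     Returns:
--         Number of completed topics
--     """
--     if not progress_json:
--         return 0
--
--     count = 0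
--     for key, value in progress_json.items():
--         # Only count if value is explicitly True
--         if value is True:
--             # If all_topic_keys provided, only count valid keys
--             if all_topic_keys is None or key in all_topic_keys:
--                 count += 1
--
--     return count
-- ===== SOURCE B (Python) =====
-- def count_completed_from_progress(progress_json, all_topic_keys=None):
--     if not progress_json:
--         return 0
--     if all_topic_keys is None:
--         return sum(1 for v in progress_json.values() if v is True)
--     count = 0
--     for key in dict.fromkeys(all_topic_keys):
--         if progress_json.get(key) is True:
--             count += 1
--     return count
-- ===== Notes on version B (the rewrite author's own statement) =====
-- stated objective: alternative
-- what changed: B reverses the traversal: with a key filter it iterates the (deduplicated) key list and looks each key up in the dict, instead of looping the dict and testing membership in the key list; without a filter it counts True values directly.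
import Mathlib
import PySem

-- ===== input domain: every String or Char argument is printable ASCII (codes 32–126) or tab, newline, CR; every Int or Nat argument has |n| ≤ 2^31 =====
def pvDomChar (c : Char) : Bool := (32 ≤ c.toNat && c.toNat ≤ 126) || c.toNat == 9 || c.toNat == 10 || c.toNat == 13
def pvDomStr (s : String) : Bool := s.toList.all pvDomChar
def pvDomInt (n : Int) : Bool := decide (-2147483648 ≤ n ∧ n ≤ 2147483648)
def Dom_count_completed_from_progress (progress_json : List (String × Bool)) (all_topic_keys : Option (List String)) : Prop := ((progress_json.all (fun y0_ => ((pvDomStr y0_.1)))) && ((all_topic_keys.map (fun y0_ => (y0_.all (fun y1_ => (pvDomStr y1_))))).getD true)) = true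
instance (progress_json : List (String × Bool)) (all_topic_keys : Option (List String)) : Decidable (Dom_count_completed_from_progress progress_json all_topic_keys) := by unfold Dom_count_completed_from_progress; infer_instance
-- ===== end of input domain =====

-- B reverses the traversal (iterate the deduplicated key list and look keys up in the dict,
-- instead of looping the dict and testing list membership); equal output proved under Pre_ (distinct dict keys).
-- ===== PORT A =====
-- Port of A: loop over the dict items; count a pair when its value is True and
-- (when a key list is given) the key occurs in the list.
def count_completed_from_progress (progress_json : List (String × Bool)) (all_topic_keys : Option (List String)) : Int :=
  if progress_json = [] then 0
  else
    progress_json.foldl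
      (fun count kv =>
        if kv.2 = true then
          match all_topic_keys with
          | none => count + 1
          | some ks => if ks.contains kv.1 then count + 1 else count
        else count)
      0

-- ===== PORT B =====
-- Port of B: with no key list, count the True values directly; with a key list,
-- iterate its deduplicated keys (dict.fromkeys = PySem.List.dedup) and look each
-- one up in the dict (first match = List.lookup).
def count_completed_from_progress_alt (progress_json : List (String × Bool)) (all_topic_keys : Option (List String)) : Int :=
  if progress_json = [] then 0
  else
    match all_topic_keys with
    | none => ((progress_json.filter (fun kv => kv.2)).length : Int)
    | some ks =>
      (PySem.List.dedup ks).foldl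
        (fun count key => if progress_json.lookup key = some true then count + 1 else count)
        0

-- ===== PRECONDITION & SPEC =====
-- Pre_ requires the association list to have pairwise-distinct keys: progress_json
-- ports a Python dict, whose keys are necessarily distinct, so every dict input
-- satisfies Pre_; an assoc list with a repeated key represents no Python dict
-- (A would count the repeated entry twice, B's lookup sees only the first).
def Pre_count_completed_from_progress (progress_json : List (String × Bool)) (all_topic_keys : Option (List String)) : Prop :=
  (progress_json.map Prod.fst).Nodup
instance (progress_json : List (String × Bool)) (all_topic_keys : Option (List String)) : Decidable (Pre_count_completed_from_progress progress_json all_topic_keys) := by unfold Pre_count_completed_from_progress; infer_instance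

def pvWitness_count_completed_from_progress : (List (String × Bool)) × Option (List String) :=
  ([("algebra", true), ("geometry", false)], some ["algebra", "algebra", "calculus"])

def Spec_count_completed_from_progress (progress_json : List (String × Bool)) (all_topic_keys : Option (List String)) (out : Int) : Prop := out = count_completed_from_progress_alt progress_json all_topic_keys
instance (progress_json : List (String × Bool)) (all_topic_keys : Option (List String)) (out : Int) : Decidable (Spec_count_completed_from_progress progress_json all_topic_keys out) := by unfold Spec_count_completed_from_progress; infer_instance

-- ===== CLAIM (what is proved, stated in full; the proofs are below) =====
def Claim_equal_count_completed_from_progress : Prop := ∀ (progress_json : List (String × Bool)) (all_topic_keys : Option (List String)), Dom_count_completed_from_progress progress_json all_topic_keys → Pre_count_completed_from_progress progress_json all_topic_keys → Spec_count_completed_from_progress progress_json all_topic_keys (count_completed_from_progress progress_json all_topic_keys)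

-- ===== LEMMAS AND PROOFS =====

-- On an assoc list with distinct keys, first-match lookup returning `some true`
-- is the same as membership of the pair (key, true).
theorem lookup_eq_some_true_iff_mem (l : List (String × Bool)) (k : String)
    (h : (l.map Prod.fst).Nodup) :
    l.lookup k = some true ↔ (k, true) ∈ l := by
  induction l with
  | nil => simp
  | cons hd tl ih =>
    obtain ⟨a, b⟩ := hd
    simp only [List.map_cons, List.nodup_cons] at h
    obtain ⟨hk, hn⟩ := h
    by_cases he : k = a
    · subst he
      simp only [List.lookup, beq_self_eq_true, List.mem_cons, Prod.mk.injEq]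
      constructor
      · rintro h'; left; simpa using h'.symm
      · rintro (⟨_, h'⟩ | h')
        · simp [h']
        · exact absurd (List.mem_map_of_mem (f := Prod.fst) h') hk
    · have hba : (k == a) = false := by simpa using he
      simp only [List.lookup, hba, List.mem_cons, Prod.mk.injEq]
      rw [ih hn]
      constructor
      · exact fun h' => Or.inr h'
      · rintro (⟨h1, _⟩ | h') <;> [exact absurd h1 he; exact h']

-- The key lists of the two counting passes are permutations of each other
-- (both are duplicate-free and have the same members), hence the counts agree.
theorem countP_eq (pj : List (String × Bool)) (ks : List String)
    (h : (pj.map Prod.fst).Nodup) :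
    pj.countP (fun kv => kv.2 && ks.contains kv.1)
      = (PySem.List.dedup ks).countP (fun key => pj.lookup key = some true) := by
  rw [List.countP_eq_length_filter, List.countP_eq_length_filter]
  rw [← List.length_map (f := Prod.fst) (as := pj.filter (fun kv => kv.2 && ks.contains kv.1))]
  apply List.Perm.length_eq
  have h1 : ((pj.filter (fun kv => kv.2 && ks.contains kv.1)).map Prod.fst).Nodup :=
    ((List.filter_sublist (l := pj)).map Prod.fst).nodup h
  have h2 : ((PySem.List.dedup ks).filter (fun key => decide (pj.lookup key = some true))).Nodup :=
    (PySem.List.nodup_dedup ks).filter _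
  rw [List.perm_ext_iff_of_nodup h1 h2]
  intro a
  simp only [List.mem_map, List.mem_filter, PySem.List.mem_dedup, Bool.and_eq_true,
    decide_eq_true_eq, List.contains_iff_mem]
  constructor
  · rintro ⟨⟨x, y⟩, ⟨hmem, hy, hks⟩, rfl⟩
    refine ⟨hks, ?_⟩
    rw [lookup_eq_some_true_iff_mem pj x h]
    exact hy ▸ hmem
  · rintro ⟨hks, hlook⟩
    rw [lookup_eq_some_true_iff_mem pj a h] at hlook
    exact ⟨(a, true), ⟨hlook, rfl, hks⟩, rfl⟩

-- ===== VERDICT (by name: the statement is the Claim_ definition above) =====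
theorem count_completed_from_progress_spec : Claim_equal_count_completed_from_progress := by
  intro pj atk _ hpre
  unfold Spec_count_completed_from_progress
  unfold count_completed_from_progress count_completed_from_progress_alt
  by_cases hemp : pj = []
  · simp [hemp]
  · rw [if_neg hemp, if_neg hemp]
    cases atk with
    | none =>
      have := PySem.List.foldl_count_if (fun kv : String × Bool => kv.2) pj 0
      simpa [List.countP_eq_length_filter] using this
    | some ks =>
      have hbody :
          (fun (count : Int) (kv : String × Bool) =>
            if kv.2 = true then
              (if ks.contains kv.1 then count + 1 else count)
            else count)
          = fun count kv =>
            if (kv.2 && ks.contains kv.1) = true then count + 1 else count := by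
        funext c kv
        by_cases h2 : kv.2 <;> simp [h2]
      dsimp only
      have hbody2 :
          (fun (count : Int) (key : String) =>
            if pj.lookup key = some true then count + 1 else count)
          = fun count key =>
            if (decide (pj.lookup key = some true)) = true then count + 1 else count := by
        funext c k
        by_cases h : pj.lookup k = some true <;> simp [h]
      rw [hbody, hbody2, PySem.List.foldl_count_if, PySem.List.foldl_count_if]
      rw [countP_eq pj ks hpre]
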